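-- pv_equiv track=rewrite | github.com/ayhem18/Towards_SE | ProblemSolving/Python/arrays/prefixArray.py | longestCommonSum
-- ===== SOURCE A (Python) =====
-- from typing import List, Union
-- from collections import defaultdict
--
-- def prefixSum(arr: List) -> Union[float, int]:
--     # the variable to save the sum at each point
--     s = 0
--
--     # the array
--     acc_sum = [0 for _ in arr]
--
--     # the loop to save the accumulative sums
--     for index, v in enumerate(arr):
--         s += v
--         acc_sum[index] = s
--
--     return acc_sum
--
-- def longestCommonSum(arr1: List[int], arr2: List[int]) -> int:
--     # I did not use the fact that arr1 and arr2 are binary which is slightly worrying me but still, why not...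
--     accsum1 = prefixSum(arr1)
--     accsum2 = prefixSum(arr2)
--
--     max_span = 0
--
--     for i, (v1, v2) in enumerate(zip(accsum1, accsum2)):
--         if v1 == v2:
--             max_span = i + 1
--
--     diff_hash = defaultdict(lambda : [])
--
--     for index, (v1, v2) in enumerate(zip(accsum1, accsum2)):
--         d = v1 - v2
--         if d not in diff_hash or len(diff_hash[d]) == 1:
--             diff_hash[d].append(index)
--         else:
--             diff_hash[d][-1] = index
--
--     # iterate through the differences hashmap
--     res = 0
--     for _, indices in diff_hash.items():
--         if len(indices) == 2:
--             res = max(indices[1] - indices[0], res)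
--
--     return max(max_span, res)
-- ===== SOURCE B (Python) =====
-- def longestCommonSum(arr1, arr2):
--     # one pass: running prefix-sum difference, dict of first occurrence, sentinel -1 for the empty prefix
--     best = 0
--     s1 = 0
--     s2 = 0
--     first = {0: -1}
--     for i, (x, y) in enumerate(zip(arr1, arr2)):
--         s1 += x
--         s2 += y
--         d = s1 - s2
--         if d in first:
--             best = max(best, i - first[d])
--         else:
--             first[d] = i
--     return best
-- ===== Notes on version B (the rewrite author's own statement) =====
-- stated objective: simpler
-- what changed: A builds two prefix-sum arrays and then runs three passes (a max-span scan, a first/last-occurrence dict build, and a final scan over the dict); B is a single pass keeping running prefix sums and a dict of first occurrences of their difference, seeded with {0: -1}, taking max(best, i - first[d]) at each repeated difference.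
import Mathlib
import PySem

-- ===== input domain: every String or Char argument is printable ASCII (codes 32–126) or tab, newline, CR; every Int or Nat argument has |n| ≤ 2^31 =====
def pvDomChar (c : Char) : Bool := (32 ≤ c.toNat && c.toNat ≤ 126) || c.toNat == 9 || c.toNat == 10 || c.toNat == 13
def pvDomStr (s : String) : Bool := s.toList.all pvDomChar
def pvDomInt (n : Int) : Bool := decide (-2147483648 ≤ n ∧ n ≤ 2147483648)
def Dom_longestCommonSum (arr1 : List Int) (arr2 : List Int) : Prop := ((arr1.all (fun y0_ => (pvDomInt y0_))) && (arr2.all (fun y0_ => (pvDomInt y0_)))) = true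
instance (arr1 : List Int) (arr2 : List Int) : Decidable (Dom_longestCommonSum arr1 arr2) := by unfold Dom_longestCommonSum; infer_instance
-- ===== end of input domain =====

-- B replaces A's three passes (prefix arrays, a first/last dict, a final scan over the dict)
-- by one pass keeping running sums and a dict of first occurrences seeded with {0: -1} (objective: simpler).

-- ===== PORT A =====
-- prefixSum: s = 0; acc_sum = [0]*len(arr); for index, v in enumerate(arr): s += v; acc_sum[index] = s
def prefixSumGo (pairs : List (Int × Int)) (s : Int) (acc : List Int) : List Int :=
  match pairs with
  | [] => acc
  | (idx, v) :: rest => prefixSumGo rest (s + v) (acc.set idx.toNat (s + v))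

def prefixSumA (arr : List Int) : List Int :=
  prefixSumGo (PySem.List.enumerate arr) 0 (arr.map (fun _ => (0 : Int)))

-- first loop: if v1 == v2: max_span = i + 1
def spanGo (pairs : List (Int × (Int × Int))) (ms : Int) : Int :=
  match pairs with
  | [] => ms
  | (i, v) :: rest => spanGo rest (if v.1 == v.2 then i + 1 else ms)

-- second loop over the defaultdict; diff_hash[d][-1] = index writes slot len-1 (the list is
-- non-empty in that branch, so the negative index -1 is exactly len-1)
def hashGo (pairs : List (Int × (Int × Int))) (h : PySem.Dict Int (List Int)) : PySem.Dict Int (List Int) :=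
  match pairs with
  | [] => h
  | (i, v) :: rest =>
    let d := v.1 - v.2
    if !h.contains d || (h.getD d []).length == 1 then
      hashGo rest (h.modify d [] (fun l => l ++ [i]))
    else
      hashGo rest (h.modify d [] (fun l => l.set (l.length - 1) i))

-- third loop: res = max(indices[1] - indices[0], res) on the length-2 entries
-- (indices[1]/indices[0] read via getD; exact because the guard fixes the length to 2)
def resGo (items : List (Int × List Int)) (r : Int) : Int :=
  match items with
  | [] => r
  | (_, ind) :: rest => resGo rest (if ind.length == 2 then max (ind.getD 1 0 - ind.getD 0 0) r else r)

def longestCommonSum (arr1 : List Int) (arr2 : List Int) : Int :=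
  let accsum1 := prefixSumA arr1
  let accsum2 := prefixSumA arr2
  let max_span := spanGo (PySem.List.enumerate (accsum1.zip accsum2)) 0
  let diff_hash := hashGo (PySem.List.enumerate (accsum1.zip accsum2)) PySem.Dict.empty
  max max_span (resGo diff_hash.items 0)

-- ===== PORT B =====
-- for i, (x, y) in enumerate(zip(arr1, arr2)): s1 += x; s2 += y; d = s1 - s2;
-- if d in first: best = max(best, i - first[d]) else: first[d] = i
def altGo (pairs : List (Int × (Int × Int))) (s1 s2 : Int) (first : PySem.Dict Int Int) (best : Int) : Int :=
  match pairs with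
  | [] => best
  | (i, v) :: rest =>
    let s1' := s1 + v.1
    let s2' := s2 + v.2
    let d := s1' - s2'
    match first.get? d with
    | some j => altGo rest s1' s2' first (max best (i - j))
    | none => altGo rest s1' s2' (first.insert d i) best

def longestCommonSum_alt (arr1 : List Int) (arr2 : List Int) : Int :=
  altGo (PySem.List.enumerate (arr1.zip arr2)) 0 0 (PySem.Dict.empty.insert 0 (-1)) 0

-- ===== PRECONDITION & SPEC =====
def Spec_longestCommonSum (arr1 : List Int) (arr2 : List Int) (out : Int) : Prop := out = longestCommonSum_alt arr1 arr2
instance (arr1 : List Int) (arr2 : List Int) (out : Int) : Decidable (Spec_longestCommonSum arr1 arr2 out) := by unfold Spec_longestCommonSum; infer_instance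

-- ===== CLAIM (what is proved, stated in full; the proofs are below) =====
def Claim_equal_longestCommonSum : Prop := ∀ (arr1 : List Int) (arr2 : List Int), Dom_longestCommonSum arr1 arr2 → Spec_longestCommonSum arr1 arr2 (longestCommonSum arr1 arr2)

-- ===== LEMMAS AND PROOFS =====

-- proof-side reference loops over the list of prefix-sum differences
def pfx : List Int → Int → List Int
  | [], _ => []
  | x :: t, s => (s + x) :: pfx t (s + x)

def dsOf : List (Int × Int) → Int → Int → List Int
  | [], _, _ => []
  | v :: t, s1, s2 => ((s1 + v.1) - (s2 + v.2)) :: dsOf t (s1 + v.1) (s2 + v.2)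

def msLoop : List (Int × Int) → Int → Int
  | [], ms => ms
  | (i, d) :: rest, ms => msLoop rest (if d == 0 then i + 1 else ms)

def hLoop : List (Int × Int) → PySem.Dict Int (List Int) → PySem.Dict Int (List Int)
  | [], h => h
  | (i, d) :: rest, h =>
    if !h.contains d || (h.getD d []).length == 1 then
      hLoop rest (h.modify d [] (fun l => l ++ [i]))
    else
      hLoop rest (h.modify d [] (fun l => l.set (l.length - 1) i))

def bLoop : List (Int × Int) → PySem.Dict Int Int → Int → Int
  | [], _, b => b
  | (i, d) :: rest, f, b =>
    match f.get? d with
    | some j => bLoop rest f (max b (i - j))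
    | none => bLoop rest (f.insert d i) b


-- normalisation: each ported loop equals its reference loop on the difference list
theorem spanGo_eq (pairs : List (Int × Int)) (k ms : Int) :
    spanGo (PySem.List.enumerate pairs k) ms
      = msLoop (PySem.List.enumerate (pairs.map (fun v => v.1 - v.2)) k) ms := by
  induction pairs generalizing k ms with
  | nil => rfl
  | cons v t ih =>
    show spanGo ((k, v) :: PySem.List.enumerate t (k+1)) ms
      = msLoop ((k, v.1 - v.2) :: PySem.List.enumerate (t.map (fun v => v.1 - v.2)) (k+1)) ms
    simp only [spanGo, msLoop]
    rw [show ((v.1 == v.2)) = ((v.1 - v.2 == 0)) from by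
      by_cases hv : v.1 = v.2 <;> simp [hv, sub_eq_zero]]
    exact ih _ _

theorem hashGo_eq (pairs : List (Int × Int)) (k : Int) (h : PySem.Dict Int (List Int)) :
    hashGo (PySem.List.enumerate pairs k) h
      = hLoop (PySem.List.enumerate (pairs.map (fun v => v.1 - v.2)) k) h := by
  induction pairs generalizing k h with
  | nil => rfl
  | cons v t ih =>
    show hashGo ((k, v) :: PySem.List.enumerate t (k+1)) h
      = hLoop ((k, v.1 - v.2) :: PySem.List.enumerate (t.map (fun v => v.1 - v.2)) (k+1)) h
    simp only [hashGo, hLoop]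
    split <;> exact ih _ _

theorem altGo_eq (pairs : List (Int × Int)) (k s1 s2 : Int) (f : PySem.Dict Int Int) (b : Int) :
    altGo (PySem.List.enumerate pairs k) s1 s2 f b
      = bLoop (PySem.List.enumerate (dsOf pairs s1 s2) k) f b := by
  induction pairs generalizing k s1 s2 f b with
  | nil => rfl
  | cons v t ih =>
    show altGo ((k, v) :: PySem.List.enumerate t (k+1)) s1 s2 f b
      = bLoop ((k, (s1 + v.1) - (s2 + v.2)) :: PySem.List.enumerate (dsOf t (s1+v.1) (s2+v.2)) (k+1)) f b
    simp only [altGo, bLoop]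
    cases f.get? ((s1 + v.1) - (s2 + v.2)) <;> simp <;> exact ih _ _ _ _ _

theorem dsOf_zip (a : List Int) : ∀ (b : List Int) (s1 s2 : Int),
    dsOf (a.zip b) s1 s2 = ((pfx a s1).zip (pfx b s2)).map (fun v => v.1 - v.2) := by
  induction a with
  | nil => intro b s1 s2; rfl
  | cons x t ih =>
    intro b s1 s2
    cases b with
    | nil => rfl
    | cons y u => simp only [List.zip_cons_cons, dsOf, pfx, List.map_cons]; rw [ih]

theorem prefixSumGo_eq (arr : List Int) : ∀ (pre : List Int) (s : Int),
    prefixSumGo (PySem.List.enumerate arr (pre.length : Int)) s (pre ++ arr.map (fun _ => (0 : Int)))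
      = pre ++ pfx arr s := by
  induction arr with
  | nil => intro pre s; rfl
  | cons x t ih =>
    intro pre s
    show prefixSumGo (((pre.length : Int), x) :: PySem.List.enumerate t ((pre.length : Int)+1)) s
        (pre ++ ((0:Int) :: t.map (fun _ => (0:Int)))) = pre ++ (s+x) :: pfx t (s+x)
    simp only [prefixSumGo, Int.toNat_natCast]
    rw [List.set_append]
    simp only [lt_irrefl, Nat.sub_self, List.set_cons_zero, if_false]
    have h1 : ((pre.length : Int) + 1) = (((pre ++ [s+x]).length : Nat) : Int) := by
      simp
    have h2 : pre ++ (s+x) :: t.map (fun _ => (0:Int)) = (pre ++ [s+x]) ++ t.map (fun _ => (0:Int)) := by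
      simp
    rw [h1]
    have h3 := ih (pre ++ [s+x]) (s+x)
    simpa using h3

theorem prefixSumA_eq (arr : List Int) : prefixSumA arr = pfx arr 0 := by
  simpa [prefixSumA] using prefixSumGo_eq arr [] 0

theorem resGo_nonneg (items : List (Int × List Int)) : ∀ (r : Int), 0 ≤ r → 0 ≤ resGo items r := by
  induction items with
  | nil => intro r hr; exact hr
  | cons p rest ih =>
    intro r hr
    obtain ⟨d, ind⟩ := p
    simp only [resGo]
    apply ih
    split <;> omega

theorem resGo_shift (items : List (Int × List Int)) : ∀ (r : Int), 0 ≤ r →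
    resGo items r = max r (resGo items 0) := by
  induction items with
  | nil => intro r hr; simp [resGo]; omega
  | cons p rest ih =>
    intro r hr
    obtain ⟨d, ind⟩ := p
    simp only [resGo]
    split
    · rw [ih (max (ind.getD 1 0 - ind.getD 0 0) r) (by omega),
        ih (max (ind.getD 1 0 - ind.getD 0 0) 0) (by omega)]
      omega
    · rw [ih r hr, ih 0 le_rfl]

theorem resGo_append (xs ys : List (Int × List Int)) : ∀ (r : Int),
    resGo (xs ++ ys) r = resGo ys (resGo xs r) := by
  induction xs with
  | nil => intro r; rfl
  | cons p rest ih =>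
    intro r
    obtain ⟨d, ind⟩ := p
    simp only [List.cons_append, resGo]
    exact ih _

theorem resGo_le (items : List (Int × List Int)) (c : Int)
    (h : ∀ p ∈ items, p.2.length = 2 → p.2.getD 1 0 - p.2.getD 0 0 ≤ c) :
    ∀ r, r ≤ c → resGo items r ≤ c := by
  induction items with
  | nil => intro r hr; exact hr
  | cons p rest ih =>
    intro r hr
    obtain ⟨d, ind⟩ := p
    simp only [resGo]
    apply ih
    · intro q hq hlen; exact h q (List.mem_cons_of_mem _ hq) hlen
    · split
      · rename_i hlen
        have := h (d, ind) List.mem_cons_self (by simpa using hlen)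
        simp at this ⊢
        omega
      · exact hr

theorem map_replace_id (d : Int) (w : List Int) (L : List (Int × List Int)) (hL : ∀ p ∈ L, p.1 ≠ d) :
    L.map (fun p => if p.1 == d then (d, w) else p) = L := by
  induction L with
  | nil => rfl
  | cons p rest ih =>
    simp only [List.map_cons]
    rw [if_neg (by simpa using hL p List.mem_cons_self), ih (fun q hq => hL q (List.mem_cons_of_mem _ hq))]

theorem items_split (h : PySem.Dict Int (List Int)) (d : Int) (l : List Int)
    (hget : h.get? d = some l) (hnd : h.keys.Nodup) :
    ∃ L1 L2, h.items = L1 ++ (d, l) :: L2 ∧ (∀ p ∈ L1, p.1 ≠ d) ∧ (∀ p ∈ L2, p.1 ≠ d) := by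
  have hmem : (d, l) ∈ h.items := PySem.Dict.mem_items_of_get?_eq_some h hget
  obtain ⟨L1, L2, hsplit⟩ := List.append_of_mem hmem
  refine ⟨L1, L2, hsplit, ?_, ?_⟩ <;>
  · intro p hp hpd
    have hkeys : h.keys = L1.map Prod.fst ++ d :: L2.map Prod.fst := by
      simp only [PySem.Dict.keys, hsplit]; simp
    rw [hkeys] at hnd
    rcases List.nodup_append.1 hnd with ⟨h1, h2, h3⟩
    have hin : d ∈ (L1.map Prod.fst) ∨ d ∈ (L2.map Prod.fst) := by
      have := List.mem_map_of_mem (f := Prod.fst) hp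
      rw [hpd] at this
      first
      | exact Or.inl this
      | exact Or.inr this
    rcases hin with hin | hin
    · exact h3 d hin d List.mem_cons_self rfl
    · exact (List.nodup_cons.1 h2).1 hin

-- the contribution structure of resGo around one looked-up entry: resGo before and after
-- overwriting the entry, with the rest of the items folded into two nonnegative constants
theorem res_at (h : PySem.Dict Int (List Int)) (d : Int) (l : List Int)
    (hget : h.get? d = some l) (hnd : h.keys.Nodup) :
    ∃ r1 X : Int, 0 ≤ r1 ∧ 0 ≤ X ∧
      resGo h.items 0 = max (if l.length == 2 then max (l.getD 1 0 - l.getD 0 0) r1 else r1) X ∧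
      ∀ w : List Int, resGo (h.insert d w).items 0
        = max (if w.length == 2 then max (w.getD 1 0 - w.getD 0 0) r1 else r1) X := by
  obtain ⟨L1, L2, hsplit, hL1, hL2⟩ := items_split h d l hget hnd
  have hcont : h.contains d = true := by
    rw [PySem.Dict.contains_eq_isSome_get?, hget]; rfl
  have hnn : ∀ v : List Int,
      0 ≤ (if (v.length == 2) = true then max (v.getD 1 0 - v.getD 0 0) (resGo L1 0) else resGo L1 0) := by
    intro v
    split
    · exact le_max_of_le_right (resGo_nonneg L1 0 le_rfl)
    · exact resGo_nonneg L1 0 le_rfl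
  refine ⟨resGo L1 0, resGo L2 0, resGo_nonneg L1 0 le_rfl, resGo_nonneg L2 0 le_rfl, ?_, ?_⟩
  · rw [hsplit, show L1 ++ (d, l) :: L2 = (L1 ++ [(d, l)]) ++ L2 by simp,
      resGo_append, resGo_append]
    simp only [resGo]
    rw [resGo_shift L2 _ (hnn l)]
  · intro w
    rw [PySem.Dict.items_insert_of_contains h w hcont, hsplit]
    simp only [List.map_append, List.map_cons, BEq.rfl, if_true]
    rw [map_replace_id d w L1 hL1, map_replace_id d w L2 hL2]
    rw [show L1 ++ (d, w) :: L2 = (L1 ++ [(d, w)]) ++ L2 by simp, resGo_append, resGo_append]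
    simp only [resGo]
    rw [resGo_shift L2 _ (hnn w)]

-- the coupling invariant: after processing the first indices (the next one is k),
-- A's state (ms, h) and B's state (f, b) are related as follows
def CInv (k ms : Int) (h : PySem.Dict Int (List Int)) (f : PySem.Dict Int Int) (b : Int) : Prop :=
  0 ≤ k ∧ h.keys.Nodup ∧ f.get? 0 = some (-1) ∧
  (∀ d l, h.get? d = some l → ∃ fi,
      0 ≤ fi ∧ fi < k ∧ f.get? d = some (if d = 0 then -1 else fi) ∧
      (l = [fi] ∨ ∃ li, l = [fi, li] ∧ fi < li ∧ li < k)) ∧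
  (∀ d j, f.get? d = some j → d ≠ 0 → ∃ l, h.get? d = some l ∧ l.head? = some j) ∧
  (ms = match h.get? 0 with | none => 0 | some l => l.getLast?.getD 0 + 1) ∧
  0 ≤ ms ∧ ms ≤ k ∧
  b = max ms (resGo h.items 0)

theorem core (ds : List Int) : ∀ (k ms : Int) (h : PySem.Dict Int (List Int))
    (f : PySem.Dict Int Int) (b : Int), CInv k ms h f b →
    bLoop (PySem.List.enumerate ds k) f b
      = max (msLoop (PySem.List.enumerate ds k) ms)
            (resGo (hLoop (PySem.List.enumerate ds k) h).items 0) := by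
  induction ds with
  | nil => intro k ms h f b hInv; exact hInv.2.2.2.2.2.2.2.2
  | cons d rest ih =>
    intro k ms h f b hInv
    obtain ⟨hk, hnd, hf0, hI4, hI5, hms, hms0, hmsk, hb⟩ := hInv
    have hresle : resGo h.items 0 ≤ k := by
      refine resGo_le h.items k ?_ 0 hk
      rintro ⟨pd, pl⟩ hp hlen
      obtain ⟨fi, hfi0, hfik, _, hstruct⟩ :=
        hI4 pd pl (PySem.Dict.get?_of_mem_items h hp hnd)
      rcases hstruct with h1 | ⟨li, h2, hlt, hltk⟩
      · rw [h1] at hlen; simp at hlen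
      · subst h2; simp only [List.getD]; simp; omega
    show bLoop ((k, d) :: PySem.List.enumerate rest (k+1)) f b
      = max (msLoop ((k, d) :: PySem.List.enumerate rest (k+1)) ms)
            (resGo (hLoop ((k, d) :: PySem.List.enumerate rest (k+1)) h).items 0)
    simp only [bLoop, msLoop, hLoop]
    cases hfd : f.get? d with
    | none =>
      have hd0 : d ≠ 0 := fun h0 => by rw [h0, hf0] at hfd; cases hfd
      have hhd : h.get? d = none := by
        cases hh : h.get? d with
        | none => rfl
        | some l =>
          obtain ⟨fi, _, _, hfd', _⟩ := hI4 d l hh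
          rw [hfd'] at hfd; cases hfd
      have hcont : h.contains d = false := by
        rw [PySem.Dict.contains_eq_isSome_get?, hhd]; rfl
      have hmod : h.modify d [] (fun l => l ++ [k]) = h.insert d [k] := by
        simp [PySem.Dict.modify, PySem.Dict.getD_of_not_contains h [] hcont]
      have hbeq : (d == 0) = false := by simpa using hd0
      rw [hcont, hbeq]
      simp only [Bool.not_false, Bool.true_or, if_true, hmod]
      refine ih (k+1) ms (h.insert d [k]) (f.insert d k) b
        ⟨by omega, PySem.Dict.nodup_keys_insert h d [k] hnd, ?_, ?_, ?_, ?_, by omega, by omega, ?_⟩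
      · rw [PySem.Dict.get?_insert_of_ne f k (fun hh => hd0 hh.symm)]; exact hf0
      · intro d' l' hget'
        by_cases hdd : d' = d
        · subst hdd
          rw [PySem.Dict.get?_insert_self] at hget'
          refine ⟨k, hk, by omega, ?_, Or.inl (by injection hget' with h'; exact h'.symm)⟩
          rw [if_neg hd0]
          exact PySem.Dict.get?_insert_self f d' k
        · rw [PySem.Dict.get?_insert_of_ne h [k] hdd] at hget'
          obtain ⟨fi, h1, h2, h3, h4⟩ := hI4 d' l' hget'
          refine ⟨fi, h1, by omega, ?_, ?_⟩
          · rw [PySem.Dict.get?_insert_of_ne f k hdd]; exact h3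
          · rcases h4 with h4 | ⟨li, e, hlt, hltk⟩
            · exact Or.inl h4
            · exact Or.inr ⟨li, e, hlt, by omega⟩
      · intro d' j' hget' hd'0
        by_cases hdd : d' = d
        · subst hdd
          rw [PySem.Dict.get?_insert_self] at hget'
          injection hget' with h'
          exact ⟨[k], PySem.Dict.get?_insert_self h d' [k], by rw [← h']; rfl⟩
        · rw [PySem.Dict.get?_insert_of_ne f k hdd] at hget'
          obtain ⟨l, hl, hhead⟩ := hI5 d' j' hget' hd'0
          exact ⟨l, by rw [PySem.Dict.get?_insert_of_ne h [k] hdd]; exact hl, hhead⟩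
      · rw [PySem.Dict.get?_insert_of_ne h [k] (fun hh => hd0 hh.symm)]
        exact hms
      · rw [PySem.Dict.items_insert_of_not_contains h [k] hcont, resGo_append]
        simpa [resGo] using hb
    | some j =>
      by_cases hd0 : d = 0
      · subst hd0
        have hj : j = -1 := by rw [hf0] at hfd; injection hfd with h'; exact h'.symm
        subst hj
        have hbeq : ((0:Int) == 0) = true := rfl
        rw [hbeq]
        cases hh0 : h.get? 0 with
        | none =>
          have hcont : h.contains 0 = false := by
            rw [PySem.Dict.contains_eq_isSome_get?, hh0]; rfl
          have hmod : h.modify 0 [] (fun l => l ++ [k]) = h.insert 0 [k] := by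
            simp [PySem.Dict.modify, PySem.Dict.getD_of_not_contains h [] hcont]
          rw [hcont]
          simp only [Bool.not_false, Bool.true_or, if_true, hmod]
          refine ih (k+1) (k+1) (h.insert 0 [k]) f (max b (k - -1))
            ⟨by omega, PySem.Dict.nodup_keys_insert h 0 [k] hnd, hf0, ?_, ?_, ?_, by omega, by omega, ?_⟩
          · intro d' l' hget'
            by_cases hdd : d' = 0
            · subst hdd
              rw [PySem.Dict.get?_insert_self] at hget'
              refine ⟨k, hk, by omega, by rw [if_pos rfl]; exact hf0,
                Or.inl (by injection hget' with h'; exact h'.symm)⟩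
            · rw [PySem.Dict.get?_insert_of_ne h [k] hdd] at hget'
              obtain ⟨fi, h1, h2, h3, h4⟩ := hI4 d' l' hget'
              refine ⟨fi, h1, by omega, h3, ?_⟩
              rcases h4 with h4 | ⟨li, e, hlt, hltk⟩
              · exact Or.inl h4
              · exact Or.inr ⟨li, e, hlt, by omega⟩
          · intro d' j' hget' hd'0
            obtain ⟨l, hl, hhead⟩ := hI5 d' j' hget' hd'0
            exact ⟨l, by rw [PySem.Dict.get?_insert_of_ne h [k] hd'0]; exact hl, hhead⟩
          · rw [PySem.Dict.get?_insert_self]; rfl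
          · rw [PySem.Dict.items_insert_of_not_contains h [k] hcont, resGo_append]
            have : resGo [(0, [k])] (resGo h.items 0) = resGo h.items 0 := by simp [resGo]
            rw [this]
            omega
        | some l =>
          obtain ⟨fi, hfi0, hfik, hfd', hstruct⟩ := hI4 0 l hh0
          have hcont : h.contains 0 = true := by
            rw [PySem.Dict.contains_eq_isSome_get?, hh0]; rfl
          have hgetD : h.getD 0 [] = l := PySem.Dict.getD_of_get?_eq_some h [] hh0
          obtain ⟨r1, X, hr1, hX, hres, hres'⟩ := res_at h 0 l hh0 hnd
          rw [hres] at hb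
          rcases hstruct with hl1 | ⟨li, hl2, hlt1, hlt2⟩
          · -- l = [fi] : the append branch of A
            subst hl1
            have hmod : h.modify 0 [] (fun l => l ++ [k]) = h.insert 0 [fi, k] := by
              simp [PySem.Dict.modify, hgetD]
            rw [hcont, hgetD]
            simp only [List.length_cons, List.length_nil, Nat.reduceAdd, beq_self_eq_true,
              Bool.not_true, Bool.false_or, if_true, hmod]
            have hresNew : resGo ((h.insert 0 [fi, k]).items) 0 = max (max (k - fi) r1) X := by
              rw [hres' [fi, k]]; simp
            refine ih (k+1) (k+1) (h.insert 0 [fi, k]) f (max b (k - -1))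
              ⟨by omega, PySem.Dict.nodup_keys_insert h 0 [fi, k] hnd, hf0, ?_, ?_, ?_,
                by omega, by omega, ?_⟩
            · intro d' l' hget'
              by_cases hdd : d' = 0
              · subst hdd
                rw [PySem.Dict.get?_insert_self] at hget'
                refine ⟨fi, hfi0, by omega, by rw [if_pos rfl]; exact hf0, ?_⟩
                exact Or.inr ⟨k, by injection hget' with h'; exact h'.symm, hfik, by omega⟩
              · rw [PySem.Dict.get?_insert_of_ne h [fi, k] hdd] at hget'
                obtain ⟨fi', h1, h2, h3, h4⟩ := hI4 d' l' hget'
                refine ⟨fi', h1, by omega, h3, ?_⟩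
                rcases h4 with h4 | ⟨li', e, hlt, hltk⟩
                · exact Or.inl h4
                · exact Or.inr ⟨li', e, hlt, by omega⟩
            · intro d' j' hget' hd'0
              obtain ⟨l', hl', hhead⟩ := hI5 d' j' hget' hd'0
              exact ⟨l', by rw [PySem.Dict.get?_insert_of_ne h [fi, k] hd'0]; exact hl', hhead⟩
            · rw [PySem.Dict.get?_insert_self]; rfl
            · rw [hresNew]
              simp at hb
              omega
          · -- l = [fi, li] : the in-place overwrite branch of A
            subst hl2
            have hmod : h.modify 0 [] (fun l => l.set (l.length - 1) k) = h.insert 0 [fi, k] := by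
              simp [PySem.Dict.modify, hgetD]
            rw [hcont, hgetD]
            simp only [List.length_cons, List.length_nil, Nat.reduceAdd, Bool.not_true,
              Bool.false_or, hmod]
            have hresNew : resGo ((h.insert 0 [fi, k]).items) 0 = max (max (k - fi) r1) X := by
              rw [hres' [fi, k]]; simp
            refine ih (k+1) (k+1) (h.insert 0 [fi, k]) f (max b (k - -1))
              ⟨by omega, PySem.Dict.nodup_keys_insert h 0 [fi, k] hnd, hf0, ?_, ?_, ?_,
                by omega, by omega, ?_⟩
            · intro d' l' hget'
              by_cases hdd : d' = 0
              · subst hdd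
                rw [PySem.Dict.get?_insert_self] at hget'
                refine ⟨fi, hfi0, by omega, by rw [if_pos rfl]; exact hf0, ?_⟩
                exact Or.inr ⟨k, by injection hget' with h'; exact h'.symm, hfik, by omega⟩
              · rw [PySem.Dict.get?_insert_of_ne h [fi, k] hdd] at hget'
                obtain ⟨fi', h1, h2, h3, h4⟩ := hI4 d' l' hget'
                refine ⟨fi', h1, by omega, h3, ?_⟩
                rcases h4 with h4 | ⟨li', e, hlt, hltk⟩
                · exact Or.inl h4
                · exact Or.inr ⟨li', e, hlt, by omega⟩
            · intro d' j' hget' hd'0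
              obtain ⟨l', hl', hhead⟩ := hI5 d' j' hget' hd'0
              exact ⟨l', by rw [PySem.Dict.get?_insert_of_ne h [fi, k] hd'0]; exact hl', hhead⟩
            · rw [PySem.Dict.get?_insert_self]; rfl
            · rw [hresNew]
              simp only [List.length_cons, List.length_nil, Nat.reduceAdd, List.getD] at hb
              simp at hb
              omega
      · -- d ≠ 0
        obtain ⟨l, hhd, hhead⟩ := hI5 d j hfd hd0
        obtain ⟨fi, hfi0, hfik, hfd', hstruct⟩ := hI4 d l hhd
        have hfij : fi = j := by
          rw [if_neg hd0] at hfd'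
          rw [hfd'] at hfd
          injection hfd with h'
        subst hfij
        have hcont : h.contains d = true := by
          rw [PySem.Dict.contains_eq_isSome_get?, hhd]; rfl
        have hgetD : h.getD d [] = l := PySem.Dict.getD_of_get?_eq_some h [] hhd
        obtain ⟨r1, X, hr1, hX, hres, hres'⟩ := res_at h d l hhd hnd
        rw [hres] at hb
        have hbeq : (d == 0) = false := by simpa using hd0
        rw [hbeq]
        have hms0' : h.get? 0 = (h.insert d [fi, k]).get? 0 :=
          (PySem.Dict.get?_insert_of_ne h [fi, k] (fun hh => hd0 hh.symm)).symm
        rcases hstruct with hl1 | ⟨li, hl2, hlt1, hlt2⟩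
        · subst hl1
          have hmod : h.modify d [] (fun l => l ++ [k]) = h.insert d [fi, k] := by
            simp [PySem.Dict.modify, hgetD]
          rw [hcont, hgetD]
          simp only [List.length_cons, List.length_nil, Nat.reduceAdd, beq_self_eq_true,
            Bool.not_true, Bool.false_or, if_true, hmod]
          have hresNew : resGo ((h.insert d [fi, k]).items) 0 = max (max (k - fi) r1) X := by
            rw [hres' [fi, k]]; simp
          refine ih (k+1) ms (h.insert d [fi, k]) f (max b (k - fi))
            ⟨by omega, PySem.Dict.nodup_keys_insert h d [fi, k] hnd, hf0, ?_, ?_, ?_,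
              by omega, by omega, ?_⟩
          · intro d' l' hget'
            by_cases hdd : d' = d
            · subst hdd
              rw [PySem.Dict.get?_insert_self] at hget'
              refine ⟨fi, hfi0, by omega, hfd', ?_⟩
              exact Or.inr ⟨k, by injection hget' with h'; exact h'.symm, hfik, by omega⟩
            · rw [PySem.Dict.get?_insert_of_ne h [fi, k] hdd] at hget'
              obtain ⟨fi', h1, h2, h3, h4⟩ := hI4 d' l' hget'
              refine ⟨fi', h1, by omega, h3, ?_⟩
              rcases h4 with h4 | ⟨li', e, hlt, hltk⟩
              · exact Or.inl h4
              · exact Or.inr ⟨li', e, hlt, by omega⟩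
          · intro d' j' hget' hd'0
            by_cases hdd : d' = d
            · subst hdd
              rw [hget'] at hfd
              injection hfd with h'
              exact ⟨[fi, k], PySem.Dict.get?_insert_self h d' [fi, k], by rw [h']; rfl⟩
            · obtain ⟨l', hl', hhead'⟩ := hI5 d' j' hget' hd'0
              exact ⟨l', by rw [PySem.Dict.get?_insert_of_ne h [fi, k] hdd]; exact hl', hhead'⟩
          · rw [← hms0']; exact hms
          · rw [hresNew]
            simp at hb
            omega
        · subst hl2
          have hmod : h.modify d [] (fun l => l.set (l.length - 1) k) = h.insert d [fi, k] := by
            simp [PySem.Dict.modify, hgetD]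
          rw [hcont, hgetD]
          simp only [List.length_cons, List.length_nil, Nat.reduceAdd, Bool.not_true,
            Bool.false_or, hmod]
          have hresNew : resGo ((h.insert d [fi, k]).items) 0 = max (max (k - fi) r1) X := by
            rw [hres' [fi, k]]; simp
          refine ih (k+1) ms (h.insert d [fi, k]) f (max b (k - fi))
            ⟨by omega, PySem.Dict.nodup_keys_insert h d [fi, k] hnd, hf0, ?_, ?_, ?_,
              by omega, by omega, ?_⟩
          · intro d' l' hget'
            by_cases hdd : d' = d
            · subst hdd
              rw [PySem.Dict.get?_insert_self] at hget'
              refine ⟨fi, hfi0, by omega, hfd', ?_⟩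
              exact Or.inr ⟨k, by injection hget' with h'; exact h'.symm, hfik, by omega⟩
            · rw [PySem.Dict.get?_insert_of_ne h [fi, k] hdd] at hget'
              obtain ⟨fi', h1, h2, h3, h4⟩ := hI4 d' l' hget'
              refine ⟨fi', h1, by omega, h3, ?_⟩
              rcases h4 with h4 | ⟨li', e, hlt, hltk⟩
              · exact Or.inl h4
              · exact Or.inr ⟨li', e, hlt, by omega⟩
          · intro d' j' hget' hd'0
            by_cases hdd : d' = d
            · subst hdd
              rw [hget'] at hfd
              injection hfd with h'
              exact ⟨[fi, k], PySem.Dict.get?_insert_self h d' [fi, k], by rw [h']; rfl⟩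
            · obtain ⟨l', hl', hhead'⟩ := hI5 d' j' hget' hd'0
              exact ⟨l', by rw [PySem.Dict.get?_insert_of_ne h [fi, k] hdd]; exact hl', hhead'⟩
          · rw [← hms0']; exact hms
          · rw [hresNew]
            simp only [List.length_cons, List.length_nil, Nat.reduceAdd, List.getD] at hb
            simp at hb
            omega

theorem longestCommonSum_spec : Claim_equal_longestCommonSum := by
  intro arr1 arr2 _
  show longestCommonSum arr1 arr2 = longestCommonSum_alt arr1 arr2
  have hA : longestCommonSum arr1 arr2
      = max (msLoop (PySem.List.enumerate (((pfx arr1 0).zip (pfx arr2 0)).map (fun v => v.1 - v.2)) 0) 0)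
            (resGo (hLoop (PySem.List.enumerate (((pfx arr1 0).zip (pfx arr2 0)).map (fun v => v.1 - v.2)) 0)
              PySem.Dict.empty).items 0) := by
    show max (spanGo (PySem.List.enumerate ((prefixSumA arr1).zip (prefixSumA arr2)) 0) 0)
        (resGo (hashGo (PySem.List.enumerate ((prefixSumA arr1).zip (prefixSumA arr2)) 0)
          PySem.Dict.empty).items 0) = _
    rw [prefixSumA_eq, prefixSumA_eq, spanGo_eq, hashGo_eq]
  have hB : longestCommonSum_alt arr1 arr2
      = bLoop (PySem.List.enumerate (((pfx arr1 0).zip (pfx arr2 0)).map (fun v => v.1 - v.2)) 0)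
          (PySem.Dict.empty.insert 0 (-1)) 0 := by
    show altGo (PySem.List.enumerate (arr1.zip arr2) 0) 0 0 (PySem.Dict.empty.insert 0 (-1)) 0 = _
    rw [altGo_eq, dsOf_zip]
  have hInv : CInv 0 0 PySem.Dict.empty (PySem.Dict.empty.insert 0 (-1)) 0 := by
    refine ⟨le_rfl, PySem.Dict.nodup_keys_empty, PySem.Dict.get?_insert_self _ 0 (-1), ?_, ?_, rfl,
      le_rfl, le_rfl, by decide⟩
    · intro d l hget
      rw [PySem.Dict.get?_empty] at hget
      cases hget
    · intro d j hget hd0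
      rw [PySem.Dict.get?_insert_of_ne PySem.Dict.empty (-1) hd0, PySem.Dict.get?_empty] at hget
      cases hget
  rw [hA, hB]
  exact (core _ 0 0 PySem.Dict.empty (PySem.Dict.empty.insert 0 (-1)) 0 hInv).symm
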